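-- pv_equiv track=rewrite | github.com/kimth007kim/python_algorithm | 프로그래머스_코딩테스트연습/LV2/[2018kakao-1차] 뉴스 클러스터.py | strMaker
-- ===== SOURCE A (Python) =====
-- def strMaker(STR):
--     word = STR.upper()
--     arr = []
--
--     for i in range(len(word) - 1):
--         if 65 <= ord(word[i]) <= 90 and 65 <= ord(word[i + 1]) <= 90:
--             tmp = ""
--             tmp += word[i] + word[i + 1]
--             arr.append(tmp)
--     return arr
-- ===== SOURCE B (Python) =====
-- def strMaker(STR):
--     word = STR.upper()
--     # pass 1: segment word into maximal runs of ASCII uppercase letters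
--     runs = []
--     cur = ""
--     for ch in word:
--         if "A" <= ch <= "Z":
--             cur += ch
--         else:
--             if cur:
--                 runs.append(cur)
--             cur = ""
--     if cur:
--         runs.append(cur)
--     # pass 2: bigrams inside each run
--     arr = []
--     for run in runs:
--         for j in range(len(run) - 1):
--             arr.append(run[j:j+2])
--     return arr
-- ===== Notes on version B (the rewrite author's own statement) =====
-- stated objective: alternative
-- what changed: Replaces the single indexed scan with a per-adjacent-pair letter test by a two-pass decomposition: first segment the uppercased string into maximal runs of A-Z letters, then emit all bigrams inside each run (inside a run no letter test is needed).
import Mathlib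
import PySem

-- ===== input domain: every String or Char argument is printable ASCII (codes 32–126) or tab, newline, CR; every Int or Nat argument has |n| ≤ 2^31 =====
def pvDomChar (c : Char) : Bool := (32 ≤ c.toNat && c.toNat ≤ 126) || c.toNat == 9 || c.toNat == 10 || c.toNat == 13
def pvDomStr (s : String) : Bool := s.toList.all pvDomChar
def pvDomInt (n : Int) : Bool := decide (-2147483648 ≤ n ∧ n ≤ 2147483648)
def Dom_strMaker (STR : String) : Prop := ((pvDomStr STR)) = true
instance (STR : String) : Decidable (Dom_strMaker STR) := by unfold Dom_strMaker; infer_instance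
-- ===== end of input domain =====

-- B changes the decomposition only (segment into maximal A-Z runs, then bigrams per run); same values, same cost.

-- shared helper: the test 65 <= ord(c) <= 90, i.e. 'A' <= c <= 'Z' on ASCII
def pvIsUp (c : Char) : Bool := 65 ≤ c.toNat && c.toNat ≤ 90

-- ===== PORT A =====
-- the loop over i in range(len(word)-1) reading word[i], word[i+1], as the
-- structural recursion over adjacent pairs of the same character list
def pvScanA : List Char → List String
  | a :: b :: rest =>
      if pvIsUp a && pvIsUp b then String.mk [a, b] :: pvScanA (b :: rest)
      else pvScanA (b :: rest)
  | _ => []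

def strMaker (STR : String) : List String :=
  pvScanA (PySem.Str.upper STR).toList

-- ===== PORT B =====
-- pass 1 of Source B: fold over the characters with state (runs, cur)
def pvStepB (st : List (List Char) × List Char) (ch : Char) : List (List Char) × List Char :=
  if pvIsUp ch then (st.1, st.2 ++ [ch])
  else (if st.2 ≠ [] then st.1 ++ [st.2] else st.1, [])

def pvRunsB (l : List Char) : List (List Char) :=
  let st := l.foldl pvStepB ([], [])
  if st.2 ≠ [] then st.1 ++ [st.2] else st.1

-- pass 2 of Source B: the j-loop appending run[j:j+2], as recursion over the run
def pvBigrams : List Char → List String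
  | a :: b :: rest => String.mk [a, b] :: pvBigrams (b :: rest)
  | _ => []

def strMaker_alt (STR : String) : List String :=
  (pvRunsB (PySem.Str.upper STR).toList).flatMap pvBigrams

-- ===== PRECONDITION & SPEC =====
def Spec_strMaker (STR : String) (out : List String) : Prop := out = strMaker_alt STR
instance (STR : String) (out : List String) : Decidable (Spec_strMaker STR out) := by unfold Spec_strMaker; infer_instance

-- ===== CLAIM (what is proved, stated in full; the proofs are below) =====
def Claim_equal_strMaker : Prop := ∀ (STR : String), Dom_strMaker STR → Spec_strMaker STR (strMaker STR)

-- ===== LEMMAS AND PROOFS =====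

-- proof-side characterisation of the segmentation: runs with a pending run `cur`
def pvRunsP (cur : List Char) : List Char → List (List Char)
  | [] => if cur ≠ [] then [cur] else []
  | c :: rest =>
      if pvIsUp c then pvRunsP (cur ++ [c]) rest
      else (if cur ≠ [] then [cur] else []) ++ pvRunsP [] rest

-- proof-side segmentation by takeWhile/dropWhile
def pvRuns : List Char → List (List Char)
  | [] => []
  | c :: rest =>
      if pvIsUp c then (c :: rest.takeWhile pvIsUp) :: pvRuns (rest.dropWhile pvIsUp)
      else pvRuns rest
termination_by l => l.length
decreasing_by
  · exact Nat.lt_succ_of_le (List.length_dropWhile_le _ _)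
  · exact Nat.lt_succ_self _

theorem pvFoldB_eq_runsP (l : List Char) (rs : List (List Char)) (cur : List Char) :
    (let st := l.foldl pvStepB (rs, cur); if st.2 ≠ [] then st.1 ++ [st.2] else st.1)
      = rs ++ pvRunsP cur l := by
  induction l generalizing rs cur with
  | nil => simp [pvRunsP]; split <;> simp
  | cons c rest ih =>
      simp only [List.foldl_cons, pvStepB, pvRunsP]
      by_cases h : pvIsUp c = true
      · simp [h, ih]
      · simp only [h, if_neg, Bool.false_eq_true, not_false_iff, if_false]
        rw [ih]
        split <;> simp

theorem pvRunsP_eq (l : List Char) (cur : List Char) :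
    pvRunsP cur l =
      if cur ≠ [] then (cur ++ l.takeWhile pvIsUp) :: pvRuns (l.dropWhile pvIsUp)
      else pvRuns l := by
  induction l generalizing cur with
  | nil => by_cases hc : cur = [] <;> simp [pvRunsP, pvRuns, hc]
  | cons c rest ih =>
      by_cases h : pvIsUp c = true
      · rw [pvRunsP, if_pos h, ih]
        have hne : cur ++ [c] ≠ [] := by simp
        rw [if_pos hne, List.takeWhile_cons_of_pos h, List.dropWhile_cons_of_pos h]
        by_cases hc : cur = []
        · subst hc; simp [pvRuns, h]
        · simp [hc]
      · rw [pvRunsP, if_neg h, ih]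
        simp only [ne_eq, not_true_eq_false]
        rw [List.takeWhile_cons_of_neg h, List.dropWhile_cons_of_neg h]
        have hr : pvRuns (c :: rest) = pvRuns rest := by rw [pvRuns, if_neg h]
        by_cases hc : cur = []
        · subst hc; simp [hr]
        · simp [hc, hr]

theorem pvRunsB_eq (l : List Char) : pvRunsB l = pvRuns l := by
  have := pvFoldB_eq_runsP l [] []
  simpa [pvRunsB, pvRunsP_eq] using this

theorem pvRuns_cons_pos (c : Char) (rest : List Char) (h : pvIsUp c = true) :
    pvRuns (c :: rest) = (c :: rest.takeWhile pvIsUp) :: pvRuns (rest.dropWhile pvIsUp) := by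
  rw [pvRuns, if_pos h]

theorem pvRuns_cons_neg (c : Char) (rest : List Char) (h : ¬ pvIsUp c = true) :
    pvRuns (c :: rest) = pvRuns rest := by
  rw [pvRuns, if_neg h]

theorem pvScanA_eq_flat (l : List Char) : pvScanA l = (pvRuns l).flatMap pvBigrams := by
  induction l with
  | nil => simp [pvScanA, pvRuns]
  | cons c rest ih =>
      match rest, ih with
      | [], _ =>
          by_cases h : pvIsUp c = true <;>
            simp [pvScanA, pvRuns, pvBigrams, h]
      | b :: r, ih =>
          by_cases h : pvIsUp c = true
          · by_cases hb : pvIsUp b = true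
            · rw [pvScanA, if_pos (by simp [h, hb] : (pvIsUp c && pvIsUp b) = true), ih,
                pvRuns_cons_pos c _ h, List.takeWhile_cons_of_pos hb,
                List.dropWhile_cons_of_pos hb, pvRuns_cons_pos b _ hb]
              simp [pvBigrams]
            · rw [pvScanA, if_neg (by simp [hb] : ¬ (pvIsUp c && pvIsUp b) = true), ih,
                pvRuns_cons_pos c _ h, List.takeWhile_cons_of_neg hb,
                List.dropWhile_cons_of_neg hb]
              simp [pvBigrams]
          · rw [pvScanA, if_neg (by simp [h] : ¬ (pvIsUp c && pvIsUp b) = true), ih,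
              pvRuns_cons_neg c _ h]

-- ===== VERDICT (by name: the statement is the Claim_ definition above) =====
theorem strMaker_spec : Claim_equal_strMaker := by
  intro STR _
  unfold Spec_strMaker strMaker strMaker_alt
  rw [pvRunsB_eq, pvScanA_eq_flat]
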